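-- pv_equiv track=rewrite | github.com/V1ctorW1ll1an/replit_codes | compare_the_triplets.py | compareTriplets
-- ===== SOURCE A (Python) =====
-- def compareTriplets(a, b):
--     results = [0,0]
--     for i in range(len(a)):
--       if a[i] > b[i]:
--         results[0] += 1
--       elif b[i] > a[i]:
--         results[1] += 1
--     return results
-- ===== SOURCE B (Python) =====
-- def compareTriplets(a, b):
--     def conquer(lo, hi):
--         if hi <= lo:
--             return [0, 0]
--         if hi - lo == 1:
--             x, y = a[lo], b[lo]
--             return [1 if x > y else 0, 1 if y > x else 0]
--         mid = (lo + hi) // 2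
--         left = conquer(lo, mid)
--         right = conquer(mid, hi)
--         return [left[0] + right[0], left[1] + right[1]]
--     return conquer(0, len(a))
-- ===== Notes on version B (the rewrite author's own statement) =====
-- stated objective: alternative
-- what changed: Replaces A's single left-to-right loop mutating a two-cell list with a divide-and-conquer recursion that splits the index range at the midpoint, scores each half independently, and adds the two score vectors.
import Mathlib
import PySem

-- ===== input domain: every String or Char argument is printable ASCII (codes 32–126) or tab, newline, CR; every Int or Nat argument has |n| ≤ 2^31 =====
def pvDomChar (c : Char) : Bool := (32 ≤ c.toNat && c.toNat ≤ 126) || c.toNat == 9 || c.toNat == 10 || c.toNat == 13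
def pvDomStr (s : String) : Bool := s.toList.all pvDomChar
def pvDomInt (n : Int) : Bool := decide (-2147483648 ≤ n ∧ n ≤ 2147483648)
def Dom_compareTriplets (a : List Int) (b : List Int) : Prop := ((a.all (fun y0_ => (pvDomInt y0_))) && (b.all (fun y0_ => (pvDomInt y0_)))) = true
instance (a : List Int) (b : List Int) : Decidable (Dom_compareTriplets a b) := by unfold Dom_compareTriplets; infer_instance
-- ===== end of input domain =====

-- B replaces A's single mutating loop with a divide-and-conquer recursion over the index
-- range (split at the midpoint, score halves independently, add the score vectors):
-- a genuinely different algorithm of the same O(n) cost.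


-- ===== PORT A =====
-- one pass over range(len(a)), a pair for the mutable two-cell list `results`
def compareTriplets (a : List Int) (b : List Int) : List Int :=
  let results : Int × Int :=
    (PySem.List.pyRange 0 a.length 1).foldl
      (fun r i =>
        if PySem.List.pyGetD a i 0 > PySem.List.pyGetD b i 0 then (r.1 + 1, r.2)
        else if PySem.List.pyGetD b i 0 > PySem.List.pyGetD a i 0 then (r.1, r.2 + 1)
        else r)
      (0, 0)
  [results.1, results.2]

-- ===== PORT B =====
-- divide and conquer on the index range [lo, hi): the nested Python `conquer`.
-- `fuel` is only a structural-termination guard ((hi-lo).toNat ≤ fuel at every call,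
-- so the 0 branch is never reached); a[lo] / b[lo] are pyGetD: Python raises there only outside Pre_
def compareTriplets_altGo (a b : List Int) : Nat → Int → Int → List Int
  | 0, _, _ => [0, 0]
  | fuel + 1, lo, hi =>
    if hi ≤ lo then [0, 0]
    else if hi - lo = 1 then
      let x := PySem.List.pyGetD a lo 0
      let y := PySem.List.pyGetD b lo 0
      [if x > y then 1 else 0, if y > x then 1 else 0]
    else
      let mid := PySem.Int.floordiv (lo + hi) 2
      let left := compareTriplets_altGo a b fuel lo mid
      let right := compareTriplets_altGo a b fuel mid hi
      [PySem.List.pyGetD left 0 0 + PySem.List.pyGetD right 0 0,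
       PySem.List.pyGetD left 1 0 + PySem.List.pyGetD right 1 0]

def compareTriplets_alt (a : List Int) (b : List Int) : List Int :=
  compareTriplets_altGo a b a.length 0 a.length

-- ===== PRECONDITION & SPEC =====
-- Pre_ excludes b shorter than a, on which both Pythons raise IndexError
def Pre_compareTriplets (a : List Int) (b : List Int) : Prop := a.length ≤ b.length
instance (a : List Int) (b : List Int) : Decidable (Pre_compareTriplets a b) := by
  unfold Pre_compareTriplets; infer_instance
def pvWitness_compareTriplets : List Int × List Int := ([1, 2, 3], [3, 2, 1])

def Spec_compareTriplets (a : List Int) (b : List Int) (out : List Int) : Prop := out = compareTriplets_alt a b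
instance (a : List Int) (b : List Int) (out : List Int) : Decidable (Spec_compareTriplets a b out) := by unfold Spec_compareTriplets; infer_instance

-- ===== CLAIM (what is proved, stated in full; the proofs are below) =====
def Claim_equal_compareTriplets : Prop := ∀ (a : List Int) (b : List Int), Dom_compareTriplets a b → Pre_compareTriplets a b → Spec_compareTriplets a b (compareTriplets a b)

-- ===== LEMMAS AND PROOFS =====

-- A's loop equals the pair of per-player counts, accumulator generalized
theorem compareTriplets_loop_eq (a b : List Int) (l : List Int) (r0 r1 : Int) :
    l.foldl
      (fun r i =>
        if PySem.List.pyGetD a i 0 > PySem.List.pyGetD b i 0 then (r.1 + 1, r.2)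
        else if PySem.List.pyGetD b i 0 > PySem.List.pyGetD a i 0 then (r.1, r.2 + 1)
        else r)
      (r0, r1)
    = (r0 + (l.countP (fun i => PySem.List.pyGetD a i 0 > PySem.List.pyGetD b i 0) : Nat),
       r1 + (l.countP (fun i => PySem.List.pyGetD b i 0 > PySem.List.pyGetD a i 0) : Nat)) := by
  induction l generalizing r0 r1 with
  | nil => simp
  | cons x xs ih =>
    simp only [List.foldl_cons, List.countP_cons]
    by_cases h1 : PySem.List.pyGetD a x 0 > PySem.List.pyGetD b x 0
    · have h2 : ¬ PySem.List.pyGetD b x 0 > PySem.List.pyGetD a x 0 := by omega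
      simp only [h1, h2, decide_true, decide_false]
      rw [ih]; simp only [Prod.mk.injEq]; push_cast; omega
    · by_cases h2 : PySem.List.pyGetD b x 0 > PySem.List.pyGetD a x 0
      · simp only [h1, h2, decide_true, decide_false]
        rw [ih]; simp only [Prod.mk.injEq]; push_cast; omega
      · simp only [h1, h2, decide_false]
        rw [ih]; simp

-- B's recursion computes the same counts over the range [lo, hi) given enough fuel
theorem compareTriplets_altGo_eq (a b : List Int) (fuel : Nat) (lo hi : Int)
    (h : lo ≤ hi) (hf : (hi - lo).toNat ≤ fuel) :
    compareTriplets_altGo a b fuel lo hi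
    = [((PySem.List.pyRange lo hi 1).countP
          (fun i => PySem.List.pyGetD a i 0 > PySem.List.pyGetD b i 0) : Nat),
       ((PySem.List.pyRange lo hi 1).countP
          (fun i => PySem.List.pyGetD b i 0 > PySem.List.pyGetD a i 0) : Nat)] := by
  induction fuel generalizing lo hi with
  | zero =>
    have : hi = lo := by omega
    subst this
    simp [compareTriplets_altGo, PySem.List.pyRange_one_eq_nil (le_refl hi)]
  | succ fuel ih =>
    rw [compareTriplets_altGo]
    by_cases h1 : hi ≤ lo
    · have : hi = lo := le_antisymm h1 h
      subst this
      simp [PySem.List.pyRange_one_eq_nil (le_refl hi)]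
    · by_cases h2 : hi - lo = 1
      · have : hi = lo + 1 := by omega
        subst this
        simp only [if_neg h1, if_pos h2, PySem.List.pyRange_one_singleton,
          List.countP_cons, List.countP_nil]
        by_cases hx : PySem.List.pyGetD a lo 0 > PySem.List.pyGetD b lo 0
        · have hy : ¬ PySem.List.pyGetD b lo 0 > PySem.List.pyGetD a lo 0 := by omega
          simp [hx, hy]
        · by_cases hy : PySem.List.pyGetD b lo 0 > PySem.List.pyGetD a lo 0
          · simp [hx, hy]
          · simp [hx, hy]
      · simp only [if_neg h1, if_neg h2]
        have hmid : PySem.Int.floordiv (lo + hi) 2 = (lo + hi) / 2 :=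
          PySem.Int.floordiv_eq_ediv_of_pos (by omega)
        have hb1 : lo < PySem.Int.floordiv (lo + hi) 2 := by rw [hmid]; omega
        have hb2 : PySem.Int.floordiv (lo + hi) 2 < hi := by rw [hmid]; omega
        rw [ih lo _ (by omega) (by omega), ih _ hi (by omega) (by omega)]
        rw [PySem.List.pyRange_one_append lo (PySem.Int.floordiv (lo + hi) 2) hi (by omega) (by omega)]
        simp only [List.countP_append]
        simp [PySem.List.pyGetD, PySem.List.pyGet?, PySem.List.pyIdx?]

-- ===== VERDICT (by name: the statement is the Claim_ definition above) =====
theorem compareTriplets_spec : Claim_equal_compareTriplets := by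
  intro a b _ _
  unfold Spec_compareTriplets compareTriplets compareTriplets_alt
  rw [compareTriplets_loop_eq, compareTriplets_altGo_eq a b a.length 0 a.length (by positivity) (by omega)]
  simp
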